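-- pv_equiv track=rewrite | github.com/EliseuODaniel/eduassist-platform | apps/ai-orchestrator/src/ai_orchestrator/engines/crewai_engine.py | _workflow_selected_tools
-- ===== SOURCE A (Python) =====
-- from typing import Any
--
-- def _workflow_selected_tools(metadata: dict[str, Any]) -> list[str]:
--     reason = str(metadata.get('reason', '') or '').strip().lower()
--     if 'visit_create' in reason:
--         return ['schedule_school_visit']
--     if any(term in reason for term in ('visit_reschedule', 'visit_cancel')):
--         return ['update_visit_booking']
--     if any(term in reason for term in ('protocol_lookup', 'summary_lookup', 'status_lookup')):
--         return ['get_workflow_status']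
--     if 'request_create' in reason:
--         return ['create_institutional_request']
--     if 'request_update' in reason:
--         return ['update_institutional_request']
--     return ['get_workflow_status']
-- ===== SOURCE B (Python) =====
-- def _workflow_selected_tools(metadata):
--     reason = str(metadata.get('reason', '') or '').strip().lower()
--     tools = ['schedule_school_visit', 'update_visit_booking', 'get_workflow_status',
--              'create_institutional_request', 'update_institutional_request']
--     rank = {'visit_create': 0, 'visit_reschedule': 1, 'visit_cancel': 1,
--             'protocol_lookup': 2, 'summary_lookup': 2, 'status_lookup': 2,
--             'request_create': 3, 'request_update': 4}
--     hits = [r for term, r in rank.items() if term in reason]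
--     if not hits:
--         return ['get_workflow_status']
--     return [tools[min(hits)]]
-- ===== Notes on version B (the rewrite author's own statement) =====
-- stated objective: alternative
-- what changed: Instead of an ordered if-cascade with early return, B collects ALL matching trigger terms in one pass via a flat term-to-priority map, then selects the tool of the best (minimum) priority from a tool array, defaulting when no term matches.
import Mathlib
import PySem

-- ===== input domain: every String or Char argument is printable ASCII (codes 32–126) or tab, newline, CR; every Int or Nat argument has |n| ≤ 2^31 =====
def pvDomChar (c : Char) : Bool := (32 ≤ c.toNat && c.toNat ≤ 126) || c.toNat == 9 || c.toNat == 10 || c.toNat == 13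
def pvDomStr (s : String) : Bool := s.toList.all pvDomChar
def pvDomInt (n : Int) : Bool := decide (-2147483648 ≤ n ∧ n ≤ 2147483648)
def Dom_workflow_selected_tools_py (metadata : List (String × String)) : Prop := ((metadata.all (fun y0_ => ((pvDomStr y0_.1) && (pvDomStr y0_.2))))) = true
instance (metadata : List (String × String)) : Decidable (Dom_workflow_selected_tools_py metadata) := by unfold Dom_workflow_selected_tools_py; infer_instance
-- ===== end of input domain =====

-- Header: B replaces A's early-return if-cascade by collecting all matching terms through a
-- flat term→priority map and selecting the minimum-priority tool (alternative decomposition).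

-- ===== PORT A =====
def workflow_selected_tools_py (metadata : List (String × String)) : List String :=
  let r0 := (PySem.Dict.ofList metadata).getD "reason" ""
  let r1 := if r0 = "" then "" else r0      -- Python `metadata.get(..) or ''`; str() on a str is identity
  let reason := PySem.Str.lower (PySem.Str.strip r1)
  if PySem.Str.isIn "visit_create" reason then ["schedule_school_visit"]
  else if ["visit_reschedule", "visit_cancel"].any (fun t => PySem.Str.isIn t reason) then ["update_visit_booking"]
  else if ["protocol_lookup", "summary_lookup", "status_lookup"].any (fun t => PySem.Str.isIn t reason) then ["get_workflow_status"]
  else if PySem.Str.isIn "request_create" reason then ["create_institutional_request"]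
  else if PySem.Str.isIn "request_update" reason then ["update_institutional_request"]
  else ["get_workflow_status"]

-- ===== PORT B =====
def pvToolsB : List String :=
  ["schedule_school_visit", "update_visit_booking", "get_workflow_status",
   "create_institutional_request", "update_institutional_request"]

def pvRankB : List (String × Int) :=
  [("visit_create", 0), ("visit_reschedule", 1), ("visit_cancel", 1),
   ("protocol_lookup", 2), ("summary_lookup", 2), ("status_lookup", 2),
   ("request_create", 3), ("request_update", 4)]

def workflow_selected_tools_py_alt (metadata : List (String × String)) : List String :=
  let r0 := (PySem.Dict.ofList metadata).getD "reason" ""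
  let r1 := if r0 = "" then "" else r0
  let reason := PySem.Str.lower (PySem.Str.strip r1)
  let hits := pvRankB.filterMap (fun p => if PySem.Str.isIn p.1 reason then some p.2 else none)
  match PySem.List.min? hits (fun x => x) with
  | none => ["get_workflow_status"]
  | some m => [(PySem.List.pyGet? pvToolsB m).getD ""]   -- index always in range (ranks 0..4); getD is unreachable

-- ===== PRECONDITION & SPEC =====
def Spec_workflow_selected_tools_py (metadata : List (String × String)) (out : List String) : Prop := out = workflow_selected_tools_py_alt metadata
instance (metadata : List (String × String)) (out : List String) : Decidable (Spec_workflow_selected_tools_py metadata out) := by unfold Spec_workflow_selected_tools_py; infer_instance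

-- ===== CLAIM =====
def Claim_equal_workflow_selected_tools_py : Prop := ∀ (metadata : List (String × String)), Dom_workflow_selected_tools_py metadata → Spec_workflow_selected_tools_py metadata (workflow_selected_tools_py metadata)

-- ===== LEMMAS AND PROOFS =====

-- ===== VERDICT =====
theorem workflow_selected_tools_py_spec : Claim_equal_workflow_selected_tools_py := by
  intro metadata _
  unfold Spec_workflow_selected_tools_py workflow_selected_tools_py workflow_selected_tools_py_alt
  simp only [pvRankB, pvToolsB, List.filterMap, List.any_cons, List.any_nil, Bool.or_false]
  generalize PySem.Str.lower (PySem.Str.strip (if (PySem.Dict.ofList metadata).getD "reason" "" = "" then "" else (PySem.Dict.ofList metadata).getD "reason" "")) = reason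
  generalize PySem.Str.isIn "visit_create" reason = b1
  generalize PySem.Str.isIn "visit_reschedule" reason = b2
  generalize PySem.Str.isIn "visit_cancel" reason = b3
  generalize PySem.Str.isIn "protocol_lookup" reason = b4
  generalize PySem.Str.isIn "summary_lookup" reason = b5
  generalize PySem.Str.isIn "status_lookup" reason = b6
  generalize PySem.Str.isIn "request_create" reason = b7
  generalize PySem.Str.isIn "request_update" reason = b8
  revert b1 b2 b3 b4 b5 b6 b7 b8
  decide
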